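-- pv_equiv track=rewrite | github.com/Dend0x/MUNI_FI | ib111/Opakovani/01/01/r4_fibfibsum.py | fibfibsum
-- ===== SOURCE A (Python) =====
-- def fib(num):
--     a = 1
--     b = 1
--
--     for i in range(num - 2):
--         c = b
--         b += a
--         a = c
--
--     return b
--
-- def fibfibsum(count):
--     if count == 1:
--         return 1
--     if count == 2:
--         return 2
--
--     a = 1
--     b = 1
--     result = 2
--
--     for i in range(count - 2):
--         c = b
--         b += a
--         a = c
--         result += fib(b)
--
--     return result
-- ===== SOURCE B (Python) =====
-- def _fib(n):
--     # fast-doubling Fibonacci: F(1) = F(2) = 1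
--     def fd(k):
--         if k == 0:
--             return (0, 1)
--         a, b = fd(k // 2)
--         c = a * (2 * b - a)
--         d = a * a + b * b
--         if k % 2:
--             return (d, c + d)
--         return (c, d)
--     return fd(n)[0]
--
-- def fibfibsum(count):
--     if count == 1:
--         return 1
--     total = 2
--     for i in range(count - 2):
--         total += _fib(_fib(i + 3))
--     return total
-- ===== Notes on version B (the rewrite author's own statement) =====
-- stated objective: alternative
-- what changed: Each linear-loop fib call is replaced by fast-doubling Fibonacci (logarithmically many squaring steps per term), and the two early-return special cases collapse into one summation loop with an empty-range base case.
import Mathlib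
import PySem

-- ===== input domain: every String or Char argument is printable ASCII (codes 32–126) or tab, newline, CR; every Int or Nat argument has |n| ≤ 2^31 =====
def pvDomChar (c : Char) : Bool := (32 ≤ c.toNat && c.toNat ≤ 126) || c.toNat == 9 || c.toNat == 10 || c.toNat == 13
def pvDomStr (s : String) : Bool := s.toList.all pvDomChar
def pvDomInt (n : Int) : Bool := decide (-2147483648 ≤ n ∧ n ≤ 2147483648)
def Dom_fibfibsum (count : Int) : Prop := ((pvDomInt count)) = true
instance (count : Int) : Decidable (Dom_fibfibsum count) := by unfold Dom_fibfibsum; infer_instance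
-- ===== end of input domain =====

-- B replaces A's linear-loop fib calls by fast-doubling Fibonacci and folds the special cases into one summation loop (objective: alternative algorithm; exact output size grows exponentially, so no speed is claimed).

-- ===== PORT A =====
-- A's helper fib: linear loop, state (a, b) -> (b, a+b), returns b
def fibA (num : Int) : Int :=
  ((List.range (num - 2).toNat).foldl (fun (st : Int × Int) _ => (st.2, st.2 + st.1)) (1, 1)).2

def fibfibsum (count : Int) : Int :=
  if count = 1 then 1
  else if count = 2 then 2
  else
    ((List.range (count - 2).toNat).foldl
      (fun (st : Int × Int × Int) _ => (st.2.1, st.2.1 + st.1, st.2.2 + fibA (st.2.1 + st.1)))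
      (1, 1, 2)).2.2

-- ===== PORT B =====
-- fast-doubling pair (F k, F (k+1))
def fdB (k : Nat) : Int × Int :=
  if h : k = 0 then (0, 1)
  else
    let p := fdB (k / 2)
    let c := p.1 * (2 * p.2 - p.1)
    let d := p.1 * p.1 + p.2 * p.2
    if k % 2 = 1 then (d, c + d) else (c, d)
decreasing_by exact Nat.div_lt_self (Nat.pos_of_ne_zero h) (by omega)

def fibB (n : Int) : Int := (fdB n.toNat).1

def fibfibsum_alt (count : Int) : Int :=
  if count = 1 then 1
  else (List.range (count - 2).toNat).foldl
        (fun (acc : Int) (i : Nat) => acc + fibB (fibB ((i : Int) + 3))) 2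

-- ===== PRECONDITION & SPEC =====
def Spec_fibfibsum (count : Int) (out : Int) : Prop := out = fibfibsum_alt count
instance (count : Int) (out : Int) : Decidable (Spec_fibfibsum count out) := by unfold Spec_fibfibsum; infer_instance

-- ===== CLAIM (what is proved, stated in full; the proofs are below) =====
def Claim_equal_fibfibsum : Prop := ∀ (count : Int), Dom_fibfibsum count → Spec_fibfibsum count (fibfibsum count)

-- ===== LEMMAS AND PROOFS =====

theorem fdB_eq (k : Nat) : fdB k = ((Nat.fib k : Int), (Nat.fib (k + 1) : Int)) := by
  induction k using Nat.strong_induction_on with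
  | _ k ih =>
    rw [fdB]
    by_cases h : k = 0
    · simp [h]
    · rw [dif_neg h]
      have hlt : k / 2 < k := Nat.div_lt_self (Nat.pos_of_ne_zero h) (by omega)
      rw [ih _ hlt]
      have hle : Nat.fib (k / 2) <= 2 * Nat.fib (k / 2 + 1) :=
        le_trans (Nat.fib_le_fib_succ) (by omega)
      by_cases hp : k % 2 = 1
      · rw [if_pos hp]
        refine Prod.ext ?_ ?_
        · show (_ : Int) = _
          conv_rhs => rw [show k = 2 * (k / 2) + 1 from by omega]
          rw [Nat.fib_two_mul_add_one]
          push_cast; ring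
        · show (_ : Int) = _
          conv_rhs => rw [show k + 1 = 2 * (k / 2 + 1) from by omega]
          rw [Nat.fib_two_mul]
          have hfact : 2 * Nat.fib (k / 2 + 1 + 1) - Nat.fib (k / 2 + 1)
              = Nat.fib (k / 2 + 1) + 2 * Nat.fib (k / 2) := by
            rw [Nat.fib_add_two]; omega
          rw [hfact]
          push_cast; ring
      · rw [if_neg hp]
        refine Prod.ext ?_ ?_
        · show (_ : Int) = _
          conv_rhs => rw [show k = 2 * (k / 2) from by omega]
          rw [Nat.fib_two_mul, Nat.cast_mul, Nat.cast_sub hle]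
          push_cast; ring
        · show (_ : Int) = _
          conv_rhs => rw [show k + 1 = 2 * (k / 2) + 1 from by omega]
          rw [Nat.fib_two_mul_add_one]
          push_cast; ring

theorem fibB_nat (j : Nat) : fibB (j : Int) = (Nat.fib j : Int) := by
  simp [fibB, fdB_eq]

-- A's fib loop from (F 1, F 2): after k steps the state is (F (k+1), F (k+2))
theorem fibA_loop (k : Nat) :
    (List.range k).foldl (fun (st : Int × Int) _ => (st.2, st.2 + st.1)) (1, 1)
      = ((Nat.fib (k + 1) : Int), (Nat.fib (k + 2) : Int)) := by
  induction k with
  | zero => simp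
  | succ k ih =>
    rw [List.range_succ, List.foldl_append, ih]
    have hb : (Nat.fib (k + 2) : Int) + (Nat.fib (k + 1) : Int) = (Nat.fib (k + 3) : Int) := by
      have h : Nat.fib (k + 3) = Nat.fib (k + 1) + Nat.fib (k + 2) := Nat.fib_add_two; omega
    simp only [List.foldl_cons, List.foldl_nil, hb]

theorem fibA_nat (j : Nat) (hj : 2 ≤ j) : fibA (j : Int) = (Nat.fib j : Int) := by
  have h : ((j : Int) - 2).toNat = j - 2 := by omega
  simp only [fibA, h, fibA_loop]
  congr 2
  omega

theorem fib_arg_ge (j : Nat) (hj : 3 ≤ j) : 2 ≤ Nat.fib j := by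
  calc 2 = Nat.fib 3 := by decide
    _ ≤ Nat.fib j := Nat.fib_mono hj

-- the shared term: A's fib applied to F j equals F (F j), for j ≥ 3
theorem term_eq (j : Nat) (hj : 3 ≤ j) :
    fibA ((Nat.fib j : Int)) = (Nat.fib (Nat.fib j) : Int) :=
  fibA_nat _ (fib_arg_ge j hj)

-- A's main loop invariant
theorem loopA (k : Nat) :
    (List.range k).foldl
      (fun (st : Int × Int × Int) _ => (st.2.1, st.2.1 + st.1, st.2.2 + fibA (st.2.1 + st.1)))
      (1, 1, 2)
    = ((Nat.fib (k + 1) : Int), (Nat.fib (k + 2) : Int),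
       2 + ∑ i ∈ Finset.range k, (Nat.fib (Nat.fib (i + 3)) : Int)) := by
  induction k with
  | zero => simp
  | succ k ih =>
    rw [List.range_succ, List.foldl_append, ih]
    have hb : (Nat.fib (k + 2) : Int) + (Nat.fib (k + 1) : Int) = (Nat.fib (k + 3) : Int) := by
      have h : Nat.fib (k + 3) = Nat.fib (k + 1) + Nat.fib (k + 2) := Nat.fib_add_two; omega
    simp only [List.foldl_cons, List.foldl_nil, hb, term_eq (k + 3) (by omega),
      Finset.sum_range_succ]
    refine Prod.ext rfl (Prod.ext rfl ?_)
    show (2 : Int) + _ + _ = _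
    ring

-- B's loop
theorem loopB (k : Nat) (c : Int) :
    (List.range k).foldl (fun (acc : Int) (i : Nat) => acc + fibB (fibB ((i : Int) + 3))) c
    = c + ∑ i ∈ Finset.range k, (Nat.fib (Nat.fib (i + 3)) : Int) := by
  induction k generalizing c with
  | zero => simp
  | succ k ih =>
    rw [List.range_succ, List.foldl_append, ih]
    have h1 : ((k : Int) + 3) = ((k + 3 : Nat) : Int) := by push_cast; ring
    simp only [List.foldl_cons, List.foldl_nil, Finset.sum_range_succ, h1, fibB_nat]
    ring

-- ===== VERDICT (by name: the statement is the Claim_ definition above) =====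
theorem fibfibsum_spec : Claim_equal_fibfibsum := by
  intro count _
  unfold Spec_fibfibsum fibfibsum fibfibsum_alt
  by_cases h1 : count = 1
  · simp [h1]
  · by_cases h2 : count = 2
    · simp [h2]
    · simp only [h1, h2, if_false, loopA, loopB]
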